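-- pv_equiv track=rewrite | github.com/dear-clouds/mio-cogs | bestof/bestof.py | paginate_titles
-- ===== SOURCE A (Python) =====
-- def paginate_titles(lists, titles_per_page=10):
--     total_pages = max((len(lst) + titles_per_page - 1) // titles_per_page for lst in lists.values())
--     pages = []
--
--     for i in range(total_pages):
--         page_content = {}
--         for category, titles in lists.items():
--             start_index = i * titles_per_page
--             end_index = start_index + titles_per_page
--             page_content[category] = titles[start_index:end_index]
--         pages.append(page_content)
--     return pages
-- ===== SOURCE B (Python) =====
-- def paginate_titles(lists, titles_per_page=10):
--     # Page-major construction over a precomputed per-category chunk table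
--     # (A slices each category on demand inside the page loop instead).
--     chunks = {cat: [titles[s:s + titles_per_page]
--                     for s in range(0, len(titles), titles_per_page)]
--               for cat, titles in lists.items()}
--     total_pages = max(len(c) for c in chunks.values())
--     return [{cat: (c[i] if i < len(c) else []) for cat, c in chunks.items()}
--             for i in range(total_pages)]
-- ===== Notes on version B (the rewrite author's own statement) =====
-- stated objective: alternative
-- what changed: B first chunks every category's title list into fixed-size pieces (one slicing pass per category), then assembles pages page-major by indexing the chunk table with [] past a category's last chunk, instead of A's page loop that re-slices every category for every page.
-- outside the precondition, e.g. on paginate_titles({'a': []}, -2): A returns [{'a': []}], B returns []; on paginate_titles({}, 10): A raises ValueError, B raises ValueError; on paginate_titles({'a': ['x']}, 0): A raises ZeroDivisionError, B raises ValueError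
import Mathlib
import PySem

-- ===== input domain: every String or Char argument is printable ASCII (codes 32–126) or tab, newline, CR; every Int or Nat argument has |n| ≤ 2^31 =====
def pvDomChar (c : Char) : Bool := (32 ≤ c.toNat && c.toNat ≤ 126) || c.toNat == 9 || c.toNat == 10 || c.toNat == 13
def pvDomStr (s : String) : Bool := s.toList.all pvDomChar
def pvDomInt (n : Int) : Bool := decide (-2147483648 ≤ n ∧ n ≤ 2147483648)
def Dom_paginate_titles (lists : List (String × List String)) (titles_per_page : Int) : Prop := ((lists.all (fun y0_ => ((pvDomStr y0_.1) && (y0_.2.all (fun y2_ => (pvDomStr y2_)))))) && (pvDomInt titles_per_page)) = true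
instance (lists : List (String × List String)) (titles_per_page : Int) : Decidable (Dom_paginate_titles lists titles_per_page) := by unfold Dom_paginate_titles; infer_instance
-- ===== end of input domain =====

-- B builds a per-category chunk table once and then assembles pages page-major
-- by indexing it; A re-slices every category inside the page loop. Equal return
-- values are proved on Pre_; objective: alternative decomposition.

-- ===== PORT A =====
def paginate_titles (lists : List (String × List String)) (titles_per_page : Int) : List (List (String × List String)) :=
  let total_pages : Int :=
    (PySem.List.max?
      (lists.map (fun p => PySem.Int.floordiv ((p.2.length : Int) + titles_per_page - 1) titles_per_page))
      (fun x => x)).getD 0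
  (PySem.List.pyRange 0 total_pages 1).foldl (fun pages i =>
    let page_content := lists.foldl (fun pc p =>
      let start_index := i * titles_per_page
      let end_index := start_index + titles_per_page
      pc ++ [(p.1, PySem.List.slice p.2 (some start_index) (some end_index))])
      ([] : List (String × List String))
    pages ++ [page_content]) []

-- ===== PORT B =====
-- the chunk list of one category: [titles[s:s+tpp] for s in range(0, len(titles), tpp)]
def pvChunks (titles : List String) (tpp : Int) : List (List String) :=
  (PySem.List.pyRange 0 (titles.length : Int) tpp).map
    (fun s => PySem.List.slice titles (some s) (some (s + tpp)))

def paginate_titles_alt (lists : List (String × List String)) (titles_per_page : Int) : List (List (String × List String)) :=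
  let chunks := lists.map (fun p => (p.1, pvChunks p.2 titles_per_page))
  let total_pages : Int :=
    (PySem.List.max? (chunks.map (fun c => ((c.2.length : Int)))) (fun x => x)).getD 0
  (PySem.List.pyRange 0 total_pages 1).map (fun i =>
    chunks.map (fun c =>
      (c.1, if i < (c.2.length : Int) then (PySem.List.pyGet? c.2 i).getD [] else [])))

-- ===== PRECONDITION & SPEC =====
-- Pre_ excludes the empty dict (both programs raise ValueError from max()), titles_per_page = 0
-- (A raises ZeroDivisionError, B ValueError), and negative titles_per_page, on which A returns
-- accidental negative-slicing results (e.g. [{'a': []}]) that differ from B's natural empty output.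
def Pre_paginate_titles (lists : List (String × List String)) (titles_per_page : Int) : Prop :=
  lists ≠ [] ∧ 1 ≤ titles_per_page
instance (lists : List (String × List String)) (titles_per_page : Int) : Decidable (Pre_paginate_titles lists titles_per_page) := by unfold Pre_paginate_titles; infer_instance

def pvWitness_paginate_titles : (List (String × List String)) × Int :=
  ([("a", ["t1", "t2", "t3"]), ("b", ["u1"])], 2)

def Spec_paginate_titles (lists : List (String × List String)) (titles_per_page : Int) (out : List (List (String × List String))) : Prop := out = paginate_titles_alt lists titles_per_page
instance (lists : List (String × List String)) (titles_per_page : Int) (out : List (List (String × List String))) : Decidable (Spec_paginate_titles lists titles_per_page out) := by unfold Spec_paginate_titles; infer_instance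

-- ===== CLAIM (what is proved, stated in full; the proofs are below) =====
def Claim_equal_paginate_titles : Prop := ∀ (lists : List (String × List String)) (titles_per_page : Int), Dom_paginate_titles lists titles_per_page → Pre_paginate_titles lists titles_per_page → Spec_paginate_titles lists titles_per_page (paginate_titles lists titles_per_page)

-- ===== LEMMAS AND PROOFS =====

-- explicit closed picture of the chunk table of one category
theorem pvChunks_eq (t : List String) {tpp : Int} (h : 1 ≤ tpp) :
    pvChunks t tpp =
      (List.range (if (0 : Int) < (t.length : Int) then (((t.length : Int) + tpp - 1) / tpp).toNat else 0)).map
        (fun (k : Nat) => PySem.List.slice t (some (tpp * (k : Int))) (some (tpp * (k : Int) + tpp))) := by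
  unfold pvChunks
  rw [PySem.List.pyRange_of_pos 0 (t.length : Int) (by omega), List.map_map]
  refine List.map_congr_left (fun k _ => ?_)
  simp only [Function.comp_apply, zero_add]

theorem pvChunks_length (t : List String) {tpp : Int} (h : 1 ≤ tpp) :
    ((pvChunks t tpp).length : Int) = PySem.Int.floordiv ((t.length : Int) + tpp - 1) tpp := by
  rw [pvChunks_eq t h, PySem.Int.floordiv_eq_ediv_of_pos (by omega)]
  simp only [List.length_map, List.length_range]
  split_ifs with hlen
  · have hnn : 0 ≤ ((t.length : Int) + tpp - 1) / tpp := Int.ediv_nonneg (by omega) (by omega)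
    omega
  · have hl0 : (t.length : Int) = 0 := by omega
    rw [hl0]
    have hz : (tpp - 1) / tpp = 0 := Int.ediv_eq_zero_of_lt (by omega) (by omega)
    simp [hz]

-- a page index inside the chunk table reads exactly the slice A takes
theorem pvChunks_get (t : List String) {tpp i : Int} (h : 1 ≤ tpp) (h0 : 0 ≤ i)
    (hi : i < ((pvChunks t tpp).length : Int)) :
    (PySem.List.pyGet? (pvChunks t tpp) i).getD [] =
      PySem.List.slice t (some (i * tpp)) (some (i * tpp + tpp)) := by
  have hk : i.toNat < (pvChunks t tpp).length := by omega
  rw [PySem.List.pyGet?_eq_some_getElem _ h0 hi, Option.getD_some,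
      List.getElem_of_eq (pvChunks_eq t h) hk]
  simp only [List.getElem_map, List.getElem_range]
  rw [Int.toNat_of_nonneg h0, mul_comm]

-- a page index past the chunk table reads an empty slice in A
theorem pvSlice_past (t : List String) {tpp i : Int} (h : 1 ≤ tpp) (h0 : 0 ≤ i)
    (hi : ((pvChunks t tpp).length : Int) ≤ i) :
    PySem.List.slice t (some (i * tpp)) (some (i * tpp + tpp)) = [] := by
  have hnn : 0 ≤ i * tpp := mul_nonneg h0 (by omega)
  rw [PySem.List.slice_toNat t hnn (by omega)]
  have hlen : (t.length : Int) ≤ i * tpp := by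
    have hfd := PySem.Int.floordiv_mul_add_mod ((t.length : Int) + tpp - 1) tpp
    have hm1 := PySem.Int.mod_lt ((t.length : Int) + tpp - 1) (b := tpp) (by omega)
    have hm2 := PySem.Int.mod_nonneg ((t.length : Int) + tpp - 1) (b := tpp) (by omega)
    rw [pvChunks_length t h] at hi
    have := mul_le_mul_of_nonneg_right hi (le_of_lt (show (0:Int) < tpp by omega))
    nlinarith
  have : t.length ≤ (i * tpp).toNat := by omega
  simp [List.drop_eq_nil_iff.mpr this]

theorem paginate_titles_eq (lists : List (String × List String)) (tpp : Int)
    (hpre : Pre_paginate_titles lists tpp) :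
    paginate_titles lists tpp = paginate_titles_alt lists tpp := by
  obtain ⟨-, htpp⟩ := hpre
  unfold paginate_titles paginate_titles_alt
  simp only [List.map_map, Function.comp_def]
  have hcounts :
      lists.map (fun c => (((pvChunks c.2 tpp).length : Int))) =
      lists.map (fun p => PySem.Int.floordiv ((p.2.length : Int) + tpp - 1) tpp) :=
    List.map_congr_left (fun p _ => pvChunks_length p.2 htpp)
  rw [hcounts]
  set N : Int :=
    (PySem.List.max?
      (lists.map (fun p => PySem.Int.floordiv ((p.2.length : Int) + tpp - 1) tpp))
      (fun x => x)).getD 0 with hN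
  simp only [PySem.List.foldl_append_singleton_eq_map, List.nil_append]
  refine List.map_congr_left (fun i hi => ?_)
  have hi0 : 0 ≤ i := (PySem.List.mem_pyRange_one.mp hi).1
  refine List.map_congr_left (fun p _ => ?_)
  by_cases hlt : i < ((pvChunks p.2 tpp).length : Int)
  · rw [if_pos hlt, pvChunks_get p.2 htpp hi0 hlt]
  · rw [if_neg hlt, pvSlice_past p.2 htpp hi0 (by omega)]

-- ===== VERDICT (by name: the statement is the Claim_ definition above) =====
theorem paginate_titles_spec : Claim_equal_paginate_titles := by
  intro lists tpp _ hpre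
  unfold Spec_paginate_titles
  exact paginate_titles_eq lists tpp hpre
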